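-- pv_equiv track=rewrite | github.com/derek-pyne/advent-of-code | src/year_2022/day1.py | get_inventories
-- ===== SOURCE A (Python) =====
-- def get_inventories(inputs):
--     inventories = []
--     current_inventory = []
--     for line in inputs:
--         if len(line) != 0:
--             # Adding to existing elfs inventory
--             current_inventory.append(int(line))
--         else:
--             # Closing out this elfs inventory and creating a fresh one
--             inventories.append(current_inventory)
--             current_inventory = []
--     inventories.append(current_inventory)
--
--     total_inventories = [sum(i) for i in inventories]
--     total_inventories.sort(reverse=True)
--     return total_inventories
-- ===== SOURCE B (Python) =====
-- def get_inventories(inputs):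
--     # Boundary-index decomposition: find the blank-line positions once, then sum
--     # the slice between consecutive boundaries; no running per-group accumulator.
--     cuts = [i for i, line in enumerate(inputs) if len(line) == 0]
--     starts = [0] + [c + 1 for c in cuts]
--     ends = cuts + [len(inputs)]
--     totals = [sum(int(x) for x in inputs[s:e]) for s, e in zip(starts, ends)]
--     totals.sort(reverse=True)
--     return totals
-- ===== Notes on version B (the rewrite author's own statement) =====
-- stated objective: alternative
-- what changed: Replaces the stateful group-accumulating loop with an index-based decomposition: collect blank-line positions once via enumerate, derive start/end boundary pairs, and sum each slice between consecutive boundaries with comprehensions, then sort descending.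
import Mathlib
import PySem

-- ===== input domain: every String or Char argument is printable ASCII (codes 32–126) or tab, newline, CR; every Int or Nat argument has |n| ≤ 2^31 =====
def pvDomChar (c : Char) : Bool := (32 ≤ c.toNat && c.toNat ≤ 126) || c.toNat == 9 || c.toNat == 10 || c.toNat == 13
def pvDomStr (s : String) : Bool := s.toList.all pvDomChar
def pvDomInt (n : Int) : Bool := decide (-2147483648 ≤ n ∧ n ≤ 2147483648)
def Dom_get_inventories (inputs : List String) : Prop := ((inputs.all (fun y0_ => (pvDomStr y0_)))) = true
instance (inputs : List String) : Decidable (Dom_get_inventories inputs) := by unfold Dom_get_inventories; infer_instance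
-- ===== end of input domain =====

-- B replaces A's stateful group-accumulating loop by boundary indices (blank positions) and slice sums (objective: alternative).


-- ===== PORT A =====
-- literal port of A: accumulate (inventories, current_inventory), append current, map sum, sort descending
def get_inventories (inputs : List String) : List Int :=
  let st := inputs.foldl
    (fun (st : List (List Int) × List Int) line =>
      if PySem.Str.len line ≠ 0 then
        (st.1, st.2 ++ [(PySem.Int.ofStr? line).getD 0])   -- int(line); Pre_ excludes the ValueError case
      else
        (st.1 ++ [st.2], []))
    ([], [])
  let inventories := st.1 ++ [st.2]
  let total_inventories := inventories.map (fun i => i.sum)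
  PySem.List.sorted total_inventories (fun x => x) true

-- ===== PORT B =====
-- int(x); Pre_ excludes the ValueError case
def pvVal (l : String) : Int := (PySem.Int.ofStr? l).getD 0

-- port of B: blank-line positions, boundary pairs, slice sums, sort descending
def get_inventories_alt (inputs : List String) : List Int :=
  let cuts := ((PySem.List.enumerate inputs 0).filter (fun p => PySem.Str.len p.2 == 0)).map (fun p => p.1)
  let starts := 0 :: cuts.map (· + 1)
  let ends := cuts ++ [(inputs.length : Int)]
  let totals := (starts.zip ends).map (fun p =>
      ((PySem.List.slice inputs (some p.1) (some p.2)).map pvVal).sum)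
  PySem.List.sorted totals (fun x => x) true

-- ===== PRECONDITION & SPEC =====
-- Pre_ excludes inputs containing a nonempty line that int() cannot parse: there Python A raises ValueError (and so does B).
def Pre_get_inventories (inputs : List String) : Prop :=
  (inputs.all (fun l => l == "" || (PySem.Int.ofStr? l).isSome)) = true
instance (inputs : List String) : Decidable (Pre_get_inventories inputs) := by unfold Pre_get_inventories; infer_instance

def pvWitness_get_inventories : List String := ["1", "2", "", " 3 "]

def Spec_get_inventories (inputs : List String) (out : List Int) : Prop := out = get_inventories_alt inputs
instance (inputs : List String) (out : List Int) : Decidable (Spec_get_inventories inputs out) := by unfold Spec_get_inventories; infer_instance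

-- ===== CLAIM (what is proved, stated in full; the proofs are below) =====
def Claim_equal_get_inventories : Prop := ∀ (inputs : List String), Dom_get_inventories inputs → Pre_get_inventories inputs → Spec_get_inventories inputs (get_inventories inputs)

-- ===== LEMMAS AND PROOFS =====

-- common reference value: the list of group sums in input order
def pvAddHead : List Int → Int → List Int
  | [], _ => []
  | x :: xs, v => (x + v) :: xs

def pvGS : List String → List Int
  | [] => [0]
  | l :: r => if l = "" then 0 :: pvGS r else pvAddHead (pvGS r) (pvVal l)

lemma pvAddHead_cons (x : Int) (xs : List Int) (v : Int) : pvAddHead (x :: xs) v = (x + v) :: xs := rfl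

lemma pvAddHead_zero (xs : List Int) : pvAddHead xs 0 = xs := by
  cases xs <;> simp [pvAddHead]

lemma pvAddHead_addHead (xs : List Int) (v c : Int) :
    pvAddHead (pvAddHead xs v) c = pvAddHead xs (c + v) := by
  cases xs with
  | nil => rfl
  | cons x t => simp [pvAddHead]; ring

lemma pv_str_ne_empty_iff (l : String) : PySem.Str.len l ≠ 0 ↔ l ≠ "" := by
  simp [PySem.Str.len_eq]

-- A's fold invariant: the summed image of the running state prefixes the group sums of the rest
lemma pvA_inv (inputs : List String) : ∀ (invs : List (List Int)) (cur : List Int),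
    (let st := inputs.foldl
        (fun (st : List (List Int) × List Int) line =>
          if PySem.Str.len line ≠ 0 then
            (st.1, st.2 ++ [(PySem.Int.ofStr? line).getD 0])
          else
            (st.1 ++ [st.2], []))
        (invs, cur)
     (st.1 ++ [st.2]).map (fun i => i.sum))
    = invs.map (fun i => i.sum) ++ pvAddHead (pvGS inputs) cur.sum := by
  induction inputs with
  | nil => intro invs cur; simp [pvGS, pvAddHead_cons]
  | cons line rest ih =>
    intro invs cur
    by_cases h : line = ""
    · subst h
      simp only [List.foldl_cons, if_neg (by decide : ¬ (PySem.Str.len "" ≠ 0))]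
      rw [ih (invs ++ [cur]) []]
      simp [pvGS, pvAddHead_zero, pvAddHead_cons]
    · have hlen : PySem.Str.len line ≠ 0 := (pv_str_ne_empty_iff line).mpr h
      simp only [List.foldl_cons, if_pos hlen, pvGS, if_neg h]
      rw [ih invs (cur ++ [(PySem.Int.ofStr? line).getD 0])]
      simp [pvAddHead_addHead, pvVal, add_comm]

-- A's pre-sort list is pvGS
lemma pvA_eq_gs (inputs : List String) :
    get_inventories inputs = PySem.List.sorted (pvGS inputs) (fun x => x) true := by
  unfold get_inventories
  have h := pvA_inv inputs [] []
  simp only [List.map_nil, List.nil_append, List.sum_nil, pvAddHead_zero] at h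
  simp only [h]

-- the cut positions of B, and B's pre-sort totals, as functions of the input
def pvCuts (inputs : List String) : List Int :=
  ((PySem.List.enumerate inputs 0).filter (fun p => PySem.Str.len p.2 == 0)).map (fun p => p.1)

def pvSliceSum (xs : List String) (p : Int × Int) : Int :=
  ((PySem.List.slice xs (some p.1) (some p.2)).map pvVal).sum

def pvTotals (inputs : List String) : List Int :=
  ((0 :: (pvCuts inputs).map (· + 1)).zip (pvCuts inputs ++ [(inputs.length : Int)])).map
    (pvSliceSum inputs)

-- enumerating from s shifts every recorded index by s
lemma pv_cuts_shift (inputs : List String) : ∀ (s : Int),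
    ((PySem.List.enumerate inputs s).filter (fun p => PySem.Str.len p.2 == 0)).map (fun p => p.1)
    = (pvCuts inputs).map (· + s) := by
  induction inputs with
  | nil => intro s; simp [pvCuts, PySem.List.enumerate_nil]
  | cons l r ih =>
    intro s
    have hpv : pvCuts (l :: r)
        = (if (PySem.Str.len l == 0) = true then [(0 : Int)] else [])
          ++ ((PySem.List.enumerate r 1).filter (fun p => PySem.Str.len p.2 == 0)).map (fun p => p.1) := by
      unfold pvCuts
      rw [PySem.List.enumerate_cons, List.filter_cons]
      by_cases hb : (PySem.Str.len l == 0) = true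
      · rw [if_pos hb, if_pos hb]; rfl
      · rw [if_neg hb, if_neg hb]; rfl
    rw [PySem.List.enumerate_cons, List.filter_cons, hpv]
    by_cases hb : (PySem.Str.len l == 0) = true
    · rw [if_pos hb, if_pos hb, List.map_cons, ih (s + 1), ih 1, List.singleton_append,
        List.map_cons, List.map_map]
      refine List.cons_eq_cons.mpr ⟨by ring, ?_⟩
      apply List.map_congr_left
      intro c _
      simp only [Function.comp_apply]
      ring
    · rw [if_neg hb, if_neg hb, ih (s + 1), ih 1, List.nil_append, List.map_map]
      apply List.map_congr_left
      intro c _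
      simp only [Function.comp_apply]
      ring

lemma pv_cuts_cons (l : String) (r : List String) :
    pvCuts (l :: r) = (if l = "" then [0] else []) ++ (pvCuts r).map (· + 1) := by
  have hpv : pvCuts (l :: r)
      = (if (PySem.Str.len l == 0) = true then [(0 : Int)] else [])
        ++ ((PySem.List.enumerate r 1).filter (fun p => PySem.Str.len p.2 == 0)).map (fun p => p.1) := by
    unfold pvCuts
    rw [PySem.List.enumerate_cons, List.filter_cons]
    by_cases hb : (PySem.Str.len l == 0) = true
    · rw [if_pos hb, if_pos hb]; rfl
    · rw [if_neg hb, if_neg hb]; rfl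
  rw [hpv, pv_cuts_shift r 1]
  have : ((PySem.Str.len l == 0) = true) ↔ l = "" := by
    simp [PySem.Str.len_eq]
  by_cases h : l = ""
  · rw [if_pos (this.mpr h), if_pos h]
  · rw [if_neg (fun hh => h (this.mp hh)), if_neg h]

lemma pv_cuts_nonneg (inputs : List String) : ∀ c ∈ pvCuts inputs, 0 ≤ c := by
  induction inputs with
  | nil => simp [pvCuts, PySem.List.enumerate_nil]
  | cons l r ih =>
    intro c hc
    rw [pv_cuts_cons] at hc
    rcases List.mem_append.mp hc with h1 | h1
    · split at h1 <;> simp_all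
    · rcases List.mem_map.mp h1 with ⟨d, hd, rfl⟩
      have := ih d hd; omega

-- slice of a cons at shifted nonnegative bounds
lemma pv_slice_shift {α : Type} (x : α) (xs : List α) (s e : Int) (hs : 0 ≤ s) (he : 0 ≤ e) :
    PySem.List.slice (x :: xs) (some (s + 1)) (some (e + 1)) = PySem.List.slice xs (some s) (some e) := by
  rw [PySem.List.slice_toNat _ (by omega) (by omega), PySem.List.slice_toNat _ hs he]
  have h1 : (s + 1).toNat = s.toNat + 1 := by omega
  rw [h1, List.drop_succ_cons]
  congr 1
  omega

lemma pv_head_slice (l : String) (r : List String) (e : Int) (he : 0 ≤ e) :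
    pvSliceSum (l :: r) (0, e + 1) = pvVal l + pvSliceSum r (0, e) := by
  unfold pvSliceSum
  rw [PySem.List.slice_toNat _ (by omega) (by omega), PySem.List.slice_toNat _ (by omega) he]
  have h1 : (e + 1).toNat = e.toNat + 1 := by omega
  simp [h1]

lemma pv_zip_shift (as bs : List Int) :
    (as.map (· + 1)).zip (bs.map (· + 1)) = (as.zip bs).map (fun p => (p.1 + 1, p.2 + 1)) := by
  rw [List.zip_map]; simp [Prod.map]

lemma pv_zip_nonneg (as bs : List Int) (ha : ∀ a ∈ as, 0 ≤ a) (hb : ∀ b ∈ bs, 0 ≤ b) :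
    ∀ p ∈ as.zip bs, 0 ≤ p.1 ∧ 0 ≤ p.2 := by
  intro p hp
  obtain ⟨a, b⟩ := p
  obtain ⟨h1, h2⟩ := List.of_mem_zip hp
  exact ⟨ha a h1, hb b h2⟩

-- shifting every boundary pair and consing the input leaves the slice sums unchanged
lemma pv_map_shift (x : String) (xs : List String) (ps : List (Int × Int))
    (h : ∀ p ∈ ps, 0 ≤ p.1 ∧ 0 ≤ p.2) :
    (ps.map (fun p => (p.1 + 1, p.2 + 1))).map (pvSliceSum (x :: xs)) = ps.map (pvSliceSum xs) := by
  rw [List.map_map]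
  apply List.map_congr_left
  intro p hp
  have := h p hp
  simp only [Function.comp_apply, pvSliceSum]
  rw [pv_slice_shift x xs p.1 p.2 this.1 this.2]

-- B's totals are pvGS
lemma pvB_eq_gs (inputs : List String) : pvTotals inputs = pvGS inputs := by
  induction inputs with
  | nil =>
    simp [pvTotals, pvCuts, pvGS, pvSliceSum, PySem.List.enumerate_nil,
      PySem.List.slice_toNat]
  | cons l r ih =>
    unfold pvTotals at ih
    have hnn := pv_cuts_nonneg r
    have hstarts : ∀ a ∈ ((0 : Int) :: (pvCuts r).map (· + 1)), 0 ≤ a := by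
      intro a ha
      rcases List.mem_cons.mp ha with rfl | ha
      · exact le_refl 0
      · rcases List.mem_map.mp ha with ⟨d, hd, rfl⟩
        have := hnn d hd; omega
    by_cases h : l = ""
    · subst h
      have hends : ∀ b ∈ (pvCuts r ++ [(r.length : Int)]), 0 ≤ b := by
        intro b hb
        rcases List.mem_append.mp hb with hb | hb
        · exact hnn b hb
        · simp at hb; omega
      unfold pvTotals
      rw [pv_cuts_cons, if_pos rfl, List.singleton_append]
      simp only [List.length_cons, List.map_cons, List.cons_append,
        List.zip_cons_cons, Nat.cast_add, Nat.cast_one]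
      have e1 : ((0 : Int) + 1) :: ((pvCuts r).map (· + 1)).map (· + 1)
          = ((0 : Int) :: (pvCuts r).map (· + 1)).map (· + 1) := by simp
      have e2 : (pvCuts r).map (· + 1) ++ [(r.length : Int) + 1]
          = (pvCuts r ++ [(r.length : Int)]).map (· + 1) := by simp
      rw [e1, e2, pv_zip_shift, pv_map_shift _ _ _ (pv_zip_nonneg _ _ hstarts hends), ih]
      have hhead : pvSliceSum ("" :: r) (0, 0) = 0 := by
        unfold pvSliceSum
        rw [PySem.List.slice_toNat _ (by omega) (by omega)]; simp
      rw [hhead, pvGS, if_pos rfl]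
    · have hv : pvGS (l :: r) = pvAddHead (pvGS r) (pvVal l) := by
        rw [pvGS, if_neg h]
      rw [hv, ← ih]
      unfold pvTotals
      rw [pv_cuts_cons, if_neg h, List.nil_append]
      rcases hc : pvCuts r with _ | ⟨c, cs⟩
      · simp only [List.map_nil, List.nil_append, List.length_cons, List.zip_cons_cons,
          List.zip_nil_left, List.map_cons, List.map_nil, pvAddHead_cons,
          Nat.cast_add, Nat.cast_one]
        rw [pv_head_slice l r (r.length : Int) (by omega)]
        simp [add_comm]
      · have hc0 : (0 : Int) ≤ c := hnn c (by rw [hc]; exact List.mem_cons_self)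
        have hcs : ∀ b ∈ cs ++ [(r.length : Int)], 0 ≤ b := by
          intro b hb
          rcases List.mem_append.mp hb with hb | hb
          · exact hnn b (by rw [hc]; exact List.mem_cons_of_mem _ hb)
          · simp at hb; omega
        have hms : ∀ a ∈ (c :: cs).map (· + 1), 0 ≤ a := by
          intro a ha
          rcases List.mem_map.mp ha with ⟨d, hd, rfl⟩
          have := hnn d (by rw [hc]; exact hd); omega
        simp only [List.map_cons, List.length_cons, List.zip_cons_cons, List.cons_append,
          pvAddHead_cons, Nat.cast_add, Nat.cast_one]
        have e1 : (c + 1 + 1) :: ((cs.map (· + 1)).map (· + 1))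
            = ((c :: cs).map (· + 1)).map (· + 1) := by simp
        have e2 : cs.map (· + 1) ++ [(r.length : Int) + 1]
            = (cs ++ [(r.length : Int)]).map (· + 1) := by simp
        rw [e1, e2, pv_zip_shift, pv_map_shift _ _ _ (pv_zip_nonneg _ _ hms hcs)]
        rw [pv_head_slice l r c hc0]
        rw [add_comm (pvVal l) (pvSliceSum r (0, c))]
        simp

-- ===== VERDICT (by name: the statement is the Claim_ definition above) =====
theorem get_inventories_spec : Claim_equal_get_inventories := by
  intro inputs _ _
  unfold Spec_get_inventories
  rw [pvA_eq_gs,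
    show get_inventories_alt inputs = PySem.List.sorted (pvTotals inputs) (fun x => x) true from rfl,
    pvB_eq_gs]
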